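-- pv_equiv track=rewrite | github.com/smily-sadha/last-miles-delivery-call-agent | last_mile_delivery/intent.py | is_unavailable
-- ===== SOURCE A (Python) =====
-- def is_unavailable(text: str) -> bool:
--     """
--     Detects user saying they are NOT available on any date
--     """
--     text = text.lower()
--     phrases = [
--         "not available",
--         "not free",
--         "cannot receive",
--         "can't receive",
--         "won't be available",
--         "none of these",
--         "no dates work",
--         "busy",
--         "out of town",
--         "not possible",
--     ]
--     return any(p in text for p in phrases)
-- ===== SOURCE B (Python) =====
-- _PHRASES = (
--     "not available",
--     "not free",
--     "cannot receive",
--     "can't receive",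
--     "won't be available",
--     "none of these",
--     "no dates work",
--     "busy",
--     "out of town",
--     "not possible",
-- )
--
-- def is_unavailable(text: str) -> bool:
--     """
--     Detects user saying they are NOT available on any date.
--     Single left-to-right scan: at each position, test whether some phrase
--     starts there, instead of one full substring scan per phrase.
--     """
--     t = text.lower()
--     for i in range(len(t) + 1):
--         for p in _PHRASES:
--             if t.startswith(p, i):
--                 return True
--     return False
-- ===== Notes on version B (the rewrite author's own statement) =====
-- stated objective: alternative
-- what changed: A runs ten independent full substring-membership scans, one per phrase; B makes a single left-to-right pass over the lowered text, testing at each position whether some phrase starts there and stopping at the first hit.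
import Mathlib
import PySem

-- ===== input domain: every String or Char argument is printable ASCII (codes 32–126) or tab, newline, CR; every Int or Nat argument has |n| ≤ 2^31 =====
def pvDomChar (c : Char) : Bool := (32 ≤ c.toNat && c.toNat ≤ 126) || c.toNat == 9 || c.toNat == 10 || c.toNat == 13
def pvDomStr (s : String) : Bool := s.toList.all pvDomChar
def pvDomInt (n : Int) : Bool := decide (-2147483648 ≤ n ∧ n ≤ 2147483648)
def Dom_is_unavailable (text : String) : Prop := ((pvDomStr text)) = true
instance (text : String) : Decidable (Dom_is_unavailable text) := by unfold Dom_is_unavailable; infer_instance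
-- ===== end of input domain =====

-- B does the same detection with one left-to-right scan of the lowered text
-- (at each position, does some phrase start here?) instead of A's ten
-- independent substring scans; same result, alternative structure.

-- ===== PORT A =====
def pvPhrases : List String :=
  ["not available", "not free", "cannot receive", "can't receive",
   "won't be available", "none of these", "no dates work", "busy",
   "out of town", "not possible"]

def is_unavailable (text : String) : Bool :=
  let t := PySem.Str.lower text
  pvPhrases.any (fun p => PySem.Str.isIn p t)

-- ===== PORT B =====
def pvPhraseChars : List (List Char) := pvPhrases.map String.toList

-- one pass: at each suffix, check whether some phrase is a prefix there
def pvScan : List Char → Bool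
  | [] => pvPhraseChars.any (fun p => p.isPrefixOf ([] : List Char))
  | c :: rest =>
    if pvPhraseChars.any (fun p => p.isPrefixOf (c :: rest)) then true
    else pvScan rest

def is_unavailable_alt (text : String) : Bool :=
  pvScan (PySem.Chars.lower text.toList)

-- ===== PRECONDITION & SPEC =====
def Spec_is_unavailable (text : String) (out : Bool) : Prop := out = is_unavailable_alt text
instance (text : String) (out : Bool) : Decidable (Spec_is_unavailable text out) := by unfold Spec_is_unavailable; infer_instance

-- ===== CLAIM (what is proved, stated in full; the proofs are below) =====
def Claim_equal_is_unavailable : Prop := ∀ (text : String), Dom_is_unavailable text → Spec_is_unavailable text (is_unavailable text)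

-- ===== LEMMAS AND PROOFS =====

theorem pvScan_iff (cs : List Char) :
    pvScan cs = true ↔ ∃ p ∈ pvPhraseChars, p <:+: cs := by
  induction cs with
  | nil =>
    simp only [pvScan, List.any_eq_true, List.infix_nil]
    constructor
    · rintro ⟨p, hp, hpre⟩
      exact ⟨p, hp, List.prefix_nil.mp (List.isPrefixOf_iff_prefix.mp hpre)⟩
    · rintro ⟨p, hp, rfl⟩
      exact ⟨[], hp, List.isPrefixOf_iff_prefix.mpr (List.nil_prefix)⟩
  | cons c rest ih =>
    constructor
    · intro h
      rw [pvScan] at h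
      split at h
      · rename_i hx
        obtain ⟨p, hp, hpre⟩ := List.any_eq_true.mp hx
        exact ⟨p, hp, (List.isPrefixOf_iff_prefix.mp hpre).isInfix⟩
      · obtain ⟨p, hp, hinf⟩ := ih.mp h
        exact ⟨p, hp, List.infix_cons_iff.mpr (Or.inr hinf)⟩
    · rintro ⟨p, hp, hinf⟩
      rw [pvScan]
      rcases List.infix_cons_iff.mp hinf with hpre | hinf'
      · have hx : (pvPhraseChars.any fun q => q.isPrefixOf (c :: rest)) = true :=
          List.any_eq_true.mpr ⟨p, hp, by simpa using List.isPrefixOf_iff_prefix.mpr hpre⟩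
        simp [hx]
      · split
        · rfl
        · exact ih.mpr ⟨p, hp, hinf'⟩

theorem is_unavailable_iff (text : String) :
    is_unavailable text = true ↔
      ∃ p ∈ pvPhraseChars, p <:+: PySem.Chars.lower text.toList := by
  simp only [is_unavailable, List.any_eq_true, PySem.Str.isIn_eq,
    PySem.Str.toList_lower, PySem.Chars.isIn_iff_infix, pvPhraseChars,
    List.mem_map]
  constructor
  · rintro ⟨p, hp, h⟩; exact ⟨p.toList, ⟨p, hp, rfl⟩, h⟩
  · rintro ⟨q, ⟨p, hp, rfl⟩, h⟩; exact ⟨p, hp, h⟩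

-- ===== VERDICT (by name: the statement is the Claim_ definition above) =====
theorem is_unavailable_spec : Claim_equal_is_unavailable := by
  intro text _
  show is_unavailable text = is_unavailable_alt text
  rw [Bool.eq_iff_iff, is_unavailable_iff, is_unavailable_alt, pvScan_iff]
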